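-- pv_equiv track=rewrite | github.com/scipopt/PySCIPOpt | aux.py | _smaller_vectors
-- ===== SOURCE A (Python) =====
-- def _smaller_vectors(alpha, mindegree = None, maxdegree = None):
-- 	"""For given vector alpha list all other vectors, which are elementwise smaller.
--
-- 	Optionally these can be restricted to some maximal degree.
--
-- 	Call:
-- 		vector_list = _smaller_vectors_bound(alpha, mindegree, maxdegree)
-- 	Input:
-- 		alpha: vector of non-negative integers
-- 		mindegree: non-negative integer
-- 		maxdegree: non-negative integer
-- 	Output:
-- 		vector_list: list of lists, containing all vectors of degree between (including) `mindegree` and `maxdegree`, which are elementwise at most `alpha`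
-- 	"""
-- 	if mindegree is None: mindegree = 0
-- 	if maxdegree is None: maxdegree = sum(alpha)
--
-- 	try:
-- 		if type(alpha) != list:
-- 			alpha = list(alpha)
-- 	except Exception as err:
-- 		raise Exception('Cannot convert argument into list.')
--
-- 	#base case
-- 	if sum(alpha) < mindegree: return []
-- 	if maxdegree == 0: return [[0 for _ in alpha]]
-- 	if alpha == []: return [[]]
--
-- 	return [[i] + l for i in range(0, min(alpha[0], maxdegree) + 1) for l in _smaller_vectors(alpha[1:], mindegree - i, maxdegree - i)]
-- ===== SOURCE B (Python) =====
-- def _smaller_vectors(alpha, mindegree = None, maxdegree = None):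
-- 	"""Iterative breadth-first enumeration: instead of A's recursion on the
-- 	tail of alpha (re-summing it at every node), B expands one level per
-- 	alpha entry, keeping an explicit list of partial vectors with their
-- 	used degree and a 'frozen' flag (budget exhausted -> zero padding),
-- 	threading the suffix sum down the loop."""
-- 	alpha = list(alpha)
-- 	n = len(alpha)
-- 	total = sum(alpha)
-- 	m = 0 if mindegree is None else mindegree
-- 	M = total if maxdegree is None else maxdegree
-- 	if total < m:
-- 		return []
-- 	if M == 0:
-- 		return [[0] * n]
-- 	suf = total
-- 	states = [([], 0, False)]  # (partial vector, used degree, frozen)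
-- 	for a in alpha:
-- 		suf -= a
-- 		nxt = []
-- 		for v, s, frozen in states:
-- 			if frozen:
-- 				nxt.append((v + [0], s, True))
-- 				continue
-- 			for i in range(0, min(a, M - s) + 1):
-- 				s2 = s + i
-- 				if suf < m - s2:
-- 					continue
-- 				nxt.append((v + [i], s2, s2 == M))
-- 		states = nxt
-- 	return [v for v, s, frozen in states]
-- ===== Notes on version B (the rewrite author's own statement) =====
-- stated objective: alternative
-- what changed: B replaces A's recursion on the tail of alpha (which re-sums the remaining vector at every node) by an iterative breadth-first expansion: an explicit list of (partial vector, used degree, frozen) states grown one level per alpha entry, with a threaded suffix sum used for the prune test.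
import Mathlib
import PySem

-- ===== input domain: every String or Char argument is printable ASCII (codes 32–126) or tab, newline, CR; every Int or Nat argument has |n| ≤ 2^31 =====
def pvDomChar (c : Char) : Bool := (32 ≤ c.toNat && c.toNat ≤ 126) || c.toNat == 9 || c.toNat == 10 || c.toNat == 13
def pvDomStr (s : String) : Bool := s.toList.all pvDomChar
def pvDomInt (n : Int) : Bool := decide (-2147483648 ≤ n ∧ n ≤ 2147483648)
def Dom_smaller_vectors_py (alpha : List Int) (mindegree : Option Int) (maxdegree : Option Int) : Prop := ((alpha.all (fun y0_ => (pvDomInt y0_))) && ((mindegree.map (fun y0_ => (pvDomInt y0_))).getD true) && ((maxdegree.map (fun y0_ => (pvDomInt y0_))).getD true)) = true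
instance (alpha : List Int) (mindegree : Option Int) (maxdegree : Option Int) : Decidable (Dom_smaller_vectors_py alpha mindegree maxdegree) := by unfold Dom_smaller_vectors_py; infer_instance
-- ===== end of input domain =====

-- ===== PORT A =====
-- B replaces A's tail recursion by an iterative breadth-first level expansion
-- over an explicit state list; return values proved identical on all inputs.

-- literal port of A's recursion: re-sums the remaining vector at every call,
-- slices alpha[1:], and loops i over range(0, min(alpha[0], maxdegree) + 1)
def pvArec (alpha : List Int) (m M : Int) : List (List Int) :=
  if alpha.sum < m then []
  else if M = 0 then [alpha.map fun _ => (0 : Int)]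
  else
    match alpha with
    | [] => [[]]
    | a :: rest =>
      (PySem.List.pyRange 0 (min a M + 1) 1).flatMap
        (fun i => (pvArec rest (m - i) (M - i)).map (fun l => i :: l))
termination_by alpha.length

def smaller_vectors_py (alpha : List Int) (mindegree : Option Int) (maxdegree : Option Int) : List (List Int) :=
  let m := match mindegree with | none => 0 | some v => v
  let M := match maxdegree with | none => alpha.sum | some v => v
  pvArec alpha m M

-- ===== PORT B =====
-- one level of Source B's loop body: every state (v, s, frozen) is extended; a
-- frozen state is padded with 0, a live one branches over i with the prune
-- test `suf < m - s2` (the `continue`) and freezes the child when s2 == M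
def pvStep (m M a suf : Int) (states : List (List Int × Int × Bool)) :
    List (List Int × Int × Bool) :=
  states.flatMap (fun st =>
    if st.2.2 then [(st.1 ++ [0], st.2.1, true)]
    else
      (PySem.List.pyRange 0 (min a (M - st.2.1) + 1) 1).flatMap (fun i =>
        if suf < m - (st.2.1 + i) then []
        else [(st.1 ++ [i], st.2.1 + i, st.2.1 + i == M)]))

-- port of Source B: early exits, then a fold over alpha threading (suf, states)
def smaller_vectors_py_alt (alpha : List Int) (mindegree : Option Int) (maxdegree : Option Int) : List (List Int) :=
  let n := alpha.length
  let total := alpha.sum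
  let m := match mindegree with | none => 0 | some v => v
  let M := match maxdegree with | none => total | some v => v
  if total < m then []
  else if M = 0 then [List.replicate n 0]
  else
    let fin := alpha.foldl
      (fun (p : Int × List (List Int × Int × Bool)) a =>
        (p.1 - a, pvStep m M a (p.1 - a) p.2))
      (total, [([], 0, false)])
    fin.2.map (fun st => st.1)

-- ===== PRECONDITION & SPEC =====
def Spec_smaller_vectors_py (alpha : List Int) (mindegree : Option Int) (maxdegree : Option Int) (out : List (List Int)) : Prop := out = smaller_vectors_py_alt alpha mindegree maxdegree
instance (alpha : List Int) (mindegree : Option Int) (maxdegree : Option Int) (out : List (List Int)) : Decidable (Spec_smaller_vectors_py alpha mindegree maxdegree out) := by unfold Spec_smaller_vectors_py; infer_instance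

-- ===== CLAIM (what is proved, stated in full; the proofs are below) =====
def Claim_equal_smaller_vectors_py : Prop := ∀ (alpha : List Int) (mindegree : Option Int) (maxdegree : Option Int), Dom_smaller_vectors_py alpha mindegree maxdegree → Spec_smaller_vectors_py alpha mindegree maxdegree (smaller_vectors_py alpha mindegree maxdegree)

-- ===== LEMMAS AND PROOFS =====

-- completion of one B state: the full vectors its subtree contributes
def pvComp (m M : Int) (rest : List Int) (st : List Int × Int × Bool) : List (List Int) :=
  if st.2.2 then [st.1 ++ List.replicate rest.length 0]
  else (pvArec rest (m - st.2.1) (M - st.2.1)).map (fun l => st.1 ++ l)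

theorem pvArec_nil_of_lt (alpha : List Int) (m M : Int) (h : alpha.sum < m) :
    pvArec alpha m M = [] := by
  rw [pvArec.eq_def, if_pos h]

theorem pvMap_zero (l : List Int) : l.map (fun _ => (0 : Int)) = List.replicate l.length 0 := by
  induction l with
  | nil => rfl
  | cons a t ih => simp [ih, List.replicate_succ]

-- one step of the fold turns each state into exactly its children's completions
theorem pvStep_comp (m M a suf : Int) (rest : List Int) (hsuf : suf = rest.sum)
    (st : List Int × Int × Bool)
    (hlive : st.2.2 = false → (a + rest.sum) ≥ m - st.2.1 ∧ st.2.1 ≠ M) :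
    (if st.2.2 then [(st.1 ++ [0], st.2.1, true)]
     else
      (PySem.List.pyRange 0 (min a (M - st.2.1) + 1) 1).flatMap (fun i =>
        if suf < m - (st.2.1 + i) then []
        else [(st.1 ++ [i], st.2.1 + i, st.2.1 + i == M)])).flatMap (pvComp m M rest)
    = pvComp m M (a :: rest) st := by
  obtain ⟨v, s, fr⟩ := st
  cases fr with
  | true =>
    simp [pvComp, List.replicate_succ]
  | false =>
    obtain ⟨hsum, hne⟩ := hlive rfl
    replace hsum : (a + rest.sum) ≥ m - s := hsum
    replace hne : s ≠ M := hne
    simp only [Bool.false_eq_true, if_false, pvComp]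
    rw [pvArec.eq_def]
    have h1 : ¬ ((a :: rest).sum < m - s) := by simp only [List.sum_cons]; omega
    rw [if_neg h1, if_neg (by omega : ¬ (M - s = 0))]
    rw [List.map_flatMap, List.flatMap_assoc]
    apply List.flatMap_congr
    intro i _
    by_cases hp : suf < m - (s + i)
    · rw [if_pos hp, List.flatMap_nil]
      rw [pvArec_nil_of_lt rest (m - s - i) (M - s - i) (by omega)]
      simp
    · rw [if_neg hp, List.flatMap_cons, List.flatMap_nil, List.append_nil]
      by_cases hM : s + i = M
      · rw [pvComp]
        dsimp only
        simp only [hM, beq_self_eq_true, if_true]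
        have : M - s - i = 0 := by omega
        rw [pvArec.eq_def, if_neg (by subst hsuf; omega : ¬ (rest.sum < m - s - i)),
          if_pos this]
        simp [List.append_assoc]
      · rw [pvComp]
        dsimp only
        simp only [beq_iff_eq, if_neg hM]
        have harg : m - (s + i) = m - s - i := by omega
        have harg2 : M - (s + i) = M - s - i := by omega
        rw [harg, harg2, List.map_map]
        simp [Function.comp, List.append_assoc]

-- the fold over `rest` computes the concatenation of all state completions
theorem pvFold_comp (m M : Int) (rest : List Int) (states : List (List Int × Int × Bool))
    (suf : Int) (hsuf : suf = rest.sum)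
    (hlive : ∀ st ∈ states, st.2.2 = false → (rest.sum ≥ m - st.2.1 ∧ st.2.1 ≠ M)) :
    (rest.foldl
      (fun (p : Int × List (List Int × Int × Bool)) a =>
        (p.1 - a, pvStep m M a (p.1 - a) p.2))
      (suf, states)).2.map (fun st => st.1)
    = states.flatMap (pvComp m M rest) := by
  induction rest generalizing states suf with
  | nil =>
    simp only [List.foldl_nil]
    induction states with
    | nil => rfl
    | cons st t ih =>
      rw [List.map_cons, List.flatMap_cons,
        ih (fun s hs h => hlive s (List.mem_cons_of_mem _ hs) h)]
      have hst := hlive st (List.mem_cons_self)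
      rw [pvComp]
      obtain ⟨v, s, fr⟩ := st
      cases fr with
      | true => simp
      | false =>
        obtain ⟨h1, h2⟩ := hst rfl
        dsimp only at h1 h2 ⊢
        simp only [Bool.false_eq_true, if_false]
        rw [pvArec.eq_def]
        simp only [List.sum_nil] at h1 ⊢
        rw [if_neg (by omega), if_neg (by omega : ¬ (M - s = 0))]
        simp
  | cons a rest ih =>
    rw [List.foldl_cons]
    have hsuf' : suf - a = rest.sum := by simp [hsuf]
    rw [ih (pvStep m M a (suf - a) states) (suf - a) hsuf' ?_]
    · rw [pvStep, List.flatMap_assoc]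
      apply List.flatMap_congr
      intro st hst
      exact pvStep_comp m M a (suf - a) rest hsuf' st
        (fun h => by simpa [List.sum_cons] using hlive st hst h)
    · -- children of live states are themselves live or frozen correctly
      intro st hst hfr
      rw [pvStep, List.mem_flatMap] at hst
      obtain ⟨p, hp, hmem⟩ := hst
      by_cases hfp : p.2.2
      · rw [if_pos hfp] at hmem
        simp only [List.mem_singleton] at hmem
        subst hmem; simp at hfr
      · rw [if_neg hfp] at hmem
        rw [List.mem_flatMap] at hmem
        obtain ⟨i, _, hmem2⟩ := hmem
        by_cases hpr : suf - a < m - (p.2.1 + i)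
        · rw [if_pos hpr] at hmem2; simp at hmem2
        · rw [if_neg hpr] at hmem2
          simp only [List.mem_singleton] at hmem2
          subst hmem2
          dsimp only at hfr ⊢
          rw [beq_eq_false_iff_ne] at hfr
          exact ⟨by omega, hfr⟩

-- ===== VERDICT (by name: the statement is the Claim_ definition above) =====
theorem smaller_vectors_py_spec : Claim_equal_smaller_vectors_py := by
  intro alpha mindegree maxdegree _
  unfold Spec_smaller_vectors_py smaller_vectors_py smaller_vectors_py_alt
  set m := match mindegree with | none => 0 | some v => v with hm
  set M := match maxdegree with | none => alpha.sum | some v => v with hM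
  by_cases h1 : alpha.sum < m
  · rw [if_pos h1, pvArec_nil_of_lt _ _ _ h1]
  · rw [if_neg h1]
    by_cases h2 : M = 0
    · rw [if_pos h2, pvArec.eq_def, if_neg h1, if_pos h2, pvMap_zero]
    · rw [if_neg h2]
      show pvArec alpha m M = _
      rw [pvFold_comp m M alpha [([], 0, false)] alpha.sum rfl ?_]
      · rw [List.flatMap_cons, List.flatMap_nil, List.append_nil, pvComp]
        dsimp only
        simp only [Bool.false_eq_true, if_false]
        simp
      · intro st hst h
        simp only [List.mem_singleton] at hst
        subst hst
        dsimp only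
        exact ⟨by omega, fun hc => h2 hc.symm⟩
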